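/- GENERATED by farm/mkstatement.py from design/units.tsv (unit `GifMakeMapObject.E`) and the assertions of Gif/Spec/Seg_GifMakeMapObject.lean — do not edit.
   THE STATEMENT of the proof unit `GifMakeMapObject.E`: segment E of `GifMakeMapObject` (9 instructions; entries 0x1079ac;
   exits ret; ranges 0x1079ac-0x1079be)
   takes each of its entry assertions to one of its exit assertions (`Gif.Spec.GifMakeMapObject.SegE`), given the contracts of its callees.
   What the names mean: ProgX/Base/Spec/Basic.lean (the shared hypotheses), Gif/Spec/Seg_GifMakeMapObject.lean (the assertions). The theorem to prove:
   `theorem GifMakeMapObject_E_ok : Gif.Spec.GifMakeMapObject_E.Statement`. -/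
import Gif.Code
import Gif.Dec.All
import Gif.Labels
import Gif.Spec.Seg_GifMakeMapObject
namespace Gif.Spec.GifMakeMapObject_E
open X86 X86.User Asan

/-- The statement of unit `GifMakeMapObject.E`. -/
def Statement : Prop :=
  ∀ (Lay : Layout) (_hLay : Lay.hi = 0x1000000) (μ : Microarch) (_hμ : UserX.MicroOK μ) (u₀ : State)
    (_hcode : HasCodeNat Lay u₀ Gif.L.GifMakeMapObject.entry Gif.Code.code_GifMakeMapObject.nat Gif.L.GifMakeMapObject.size),
    Gif.Spec.GifMakeMapObject.SegE Lay μ u₀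

end Gif.Spec.GifMakeMapObject_E
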